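-- pv_equiv track=rewrite | github.com/sdshah09/Coding_Journey | Array_Strings/Maximum_Number_Of_Balloons.py | maxNumberOfBalloons2
-- ===== SOURCE A (Python) =====
-- from collections import defaultdict
--
-- def maxNumberOfBalloons2(text: str) -> int:
--     s = "balloon"
--     freq = defaultdict(int)
--
--     # Count the frequency of each character in the given text
--     for char in text:
--         if char in s:
--             freq[char] += 1
--
--     # Calculate the number of times we can form "balloon"
--     balloon_count = freq['b']
--     balloon_count = min(balloon_count, freq['a'])
--     balloon_count = min(balloon_count, freq['l'] // 2)
--     balloon_count = min(balloon_count, freq['o'] // 2)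
--     balloon_count = min(balloon_count, freq['n'])
--
--     return balloon_count
-- ===== SOURCE B (Python) =====
-- def maxNumberOfBalloons2(text: str) -> int:
--     # Tally the five needed letters into plain scalar counters (no dict),
--     # then greedily "spend" one balloon's worth of letters at a time.
--     b = a = l = o = n = 0
--     for ch in text:
--         if ch == 'b':
--             b += 1
--         elif ch == 'a':
--             a += 1
--         elif ch == 'l':
--             l += 1
--         elif ch == 'o':
--             o += 1
--         elif ch == 'n':
--             n += 1
--     k = 0
--     while b >= 1 and a >= 1 and l >= 2 and o >= 2 and n >= 1:
--         b -= 1; a -= 1; l -= 2; o -= 2; n -= 1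
--         k += 1
--     return k
-- ===== Notes on version B (the rewrite author's own statement) =====
-- stated objective: alternative
-- what changed: Replaces the defaultdict frequency table and the min/floor-division arithmetic by five scalar counters filled in one pass and a greedy loop that repeatedly subtracts one 'balloon' worth of letters, counting how many times it succeeds.
import Mathlib
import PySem

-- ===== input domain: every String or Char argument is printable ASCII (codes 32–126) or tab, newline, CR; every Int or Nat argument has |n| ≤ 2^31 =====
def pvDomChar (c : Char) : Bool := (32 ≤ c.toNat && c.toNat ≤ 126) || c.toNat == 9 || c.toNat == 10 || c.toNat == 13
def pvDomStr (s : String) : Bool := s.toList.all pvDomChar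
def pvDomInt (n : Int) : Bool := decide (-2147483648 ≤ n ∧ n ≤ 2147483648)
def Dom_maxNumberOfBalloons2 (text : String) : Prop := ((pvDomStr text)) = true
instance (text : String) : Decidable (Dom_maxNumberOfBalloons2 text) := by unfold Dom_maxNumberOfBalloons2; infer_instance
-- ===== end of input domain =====

-- B drops the defaultdict and the min/floordiv arithmetic: five scalar counters filled in one
-- pass, then a greedy loop repeatedly subtracting one "balloon" worth of letters (alternative).

-- ===== PORT A =====
def maxNumberOfBalloons2 (text : String) : Int :=
  let s := "balloon"
  let freq : PySem.Dict Char Int :=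
    text.toList.foldl
      (fun freq char =>
        if PySem.Str.isIn (String.singleton char) s then
          freq.insert char (freq.getD char 0 + 1)
        else freq)
      PySem.Dict.empty
  let balloon_count := freq.getD 'b' 0
  let balloon_count := min balloon_count (freq.getD 'a' 0)
  let balloon_count := min balloon_count (PySem.Int.floordiv (freq.getD 'l' 0) 2)
  let balloon_count := min balloon_count (PySem.Int.floordiv (freq.getD 'o' 0) 2)
  let balloon_count := min balloon_count (freq.getD 'n' 0)
  balloon_count

-- ===== PORT B =====
-- the 'while b >= 1 and a >= 1 and l >= 2 and o >= 2 and n >= 1' loop of Source B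
def pvDrain (b a l o n k : Int) : Int :=
  if b ≥ 1 ∧ a ≥ 1 ∧ l ≥ 2 ∧ o ≥ 2 ∧ n ≥ 1 then
    pvDrain (b - 1) (a - 1) (l - 2) (o - 2) (n - 1) (k + 1)
  else k
termination_by b.toNat
decreasing_by omega

def maxNumberOfBalloons2_alt (text : String) : Int :=
  let st := text.toList.foldl
    (fun (st : Int × Int × Int × Int × Int) ch =>
      let (b, a, l, o, n) := st
      if ch = 'b' then (b + 1, a, l, o, n)
      else if ch = 'a' then (b, a + 1, l, o, n)
      else if ch = 'l' then (b, a, l + 1, o, n)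
      else if ch = 'o' then (b, a, l, o + 1, n)
      else if ch = 'n' then (b, a, l, o, n + 1)
      else (b, a, l, o, n))
    (0, 0, 0, 0, 0)
  let (b, a, l, o, n) := st
  pvDrain b a l o n 0

-- ===== PRECONDITION & SPEC =====
def Spec_maxNumberOfBalloons2 (text : String) (out : Int) : Prop := out = maxNumberOfBalloons2_alt text
instance (text : String) (out : Int) : Decidable (Spec_maxNumberOfBalloons2 text out) := by unfold Spec_maxNumberOfBalloons2; infer_instance

-- ===== CLAIM (what is proved, stated in full; the proofs are below) =====
def Claim_equal_maxNumberOfBalloons2 : Prop := ∀ (text : String), Dom_maxNumberOfBalloons2 text → Spec_maxNumberOfBalloons2 text (maxNumberOfBalloons2 text)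

-- ===== LEMMAS AND PROOFS =====

-- A's conditional counting fold equals the unconditional fold over the filtered list.
theorem foldl_if_insert_filter (p : Char → Bool) :
    ∀ (l : List Char) (d : PySem.Dict Char Int),
      l.foldl (fun d c => if p c then d.insert c (d.getD c 0 + 1) else d) d
        = (l.filter p).foldl (fun d c => d.insert c (d.getD c 0 + 1)) d := by
  intro l
  induction l with
  | nil => intro d; simp
  | cons h t ih =>
    intro d
    by_cases hp : p h = true <;> simp [List.foldl_cons, hp, ih]

-- the frequency table A builds reads back the plain character count, for letters of "balloon"
theorem freq_getD (text : String) (v : Char)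
    (hv : PySem.Str.isIn (String.singleton v) "balloon" = true) :
    (text.toList.foldl
      (fun (freq : PySem.Dict Char Int) char =>
        if PySem.Str.isIn (String.singleton char) "balloon" then
          freq.insert char (freq.getD char 0 + 1)
        else freq)
      PySem.Dict.empty).getD v 0 = (text.toList.count v : Int) := by
  rw [foldl_if_insert_filter (fun c => PySem.Str.isIn (String.singleton c) "balloon")]
  rw [PySem.Dict.getD_foldl_insert_add_one]
  rw [List.count_filter (p := fun c => PySem.Str.isIn (String.singleton c) "balloon")
        (a := v) (l := text.toList) hv]
  simp

-- B's five-counter fold computes the plain character counts.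
theorem counters_eq (l : List Char) :
    ∀ (b a lc o n : Int),
      l.foldl
        (fun (st : Int × Int × Int × Int × Int) ch =>
          let (b, a, l, o, n) := st
          if ch = 'b' then (b + 1, a, l, o, n)
          else if ch = 'a' then (b, a + 1, l, o, n)
          else if ch = 'l' then (b, a, l + 1, o, n)
          else if ch = 'o' then (b, a, l, o + 1, n)
          else if ch = 'n' then (b, a, l, o, n + 1)
          else (b, a, l, o, n))
        (b, a, lc, o, n)
      = (b + l.count 'b', a + l.count 'a', lc + l.count 'l',
         o + l.count 'o', n + l.count 'n') := by
  induction l with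
  | nil => intro b a lc o n; simp
  | cons h t ih =>
    intro b a lc o n
    by_cases hb : h = 'b'
    · subst hb; simp [List.foldl_cons, ih]; ring
    · by_cases ha : h = 'a'
      · subst ha; simp [List.foldl_cons, ih]; ring
      · by_cases hl : h = 'l'
        · subst hl; simp [List.foldl_cons, ih]; ring
        · by_cases ho : h = 'o'
          · subst ho; simp [List.foldl_cons, ih]; ring
          · by_cases hn : h = 'n'
            · subst hn; simp [List.foldl_cons, ih]; ring
            · simp [List.foldl_cons, ih, hb, ha, hl, ho, hn]

-- the greedy subtraction loop computes the min/floordiv formula, for nonnegative counts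
theorem pvDrain_eq :
    ∀ (fuel : Nat) (b a l o n k : Int), b.toNat ≤ fuel →
      0 ≤ b → 0 ≤ a → 0 ≤ l → 0 ≤ o → 0 ≤ n →
      pvDrain b a l o n k
        = k + min (min (min (min b a) (PySem.Int.floordiv l 2))
                       (PySem.Int.floordiv o 2)) n := by
  intro fuel
  induction fuel with
  | zero =>
    intro b a l o n k hf hb ha hl ho hn
    rw [pvDrain, if_neg (by omega)]
    rw [PySem.Int.floordiv_eq_ediv_of_pos (by omega), PySem.Int.floordiv_eq_ediv_of_pos (by omega)]
    omega
  | succ m ih =>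
    intro b a l o n k hf hb ha hl ho hn
    rw [pvDrain]
    by_cases hc : b ≥ 1 ∧ a ≥ 1 ∧ l ≥ 2 ∧ o ≥ 2 ∧ n ≥ 1
    · rw [if_pos hc]
      rw [ih (b - 1) (a - 1) (l - 2) (o - 2) (n - 1) (k + 1) (by omega)
            (by omega) (by omega) (by omega) (by omega) (by omega)]
      rw [PySem.Int.floordiv_eq_ediv_of_pos (by omega), PySem.Int.floordiv_eq_ediv_of_pos (by omega),
          PySem.Int.floordiv_eq_ediv_of_pos (by omega), PySem.Int.floordiv_eq_ediv_of_pos (by omega)]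
      omega
    · rw [if_neg hc]
      rw [PySem.Int.floordiv_eq_ediv_of_pos (by omega), PySem.Int.floordiv_eq_ediv_of_pos (by omega)]
      omega

-- ===== VERDICT (by name: the statement is the Claim_ definition above) =====
theorem maxNumberOfBalloons2_spec : Claim_equal_maxNumberOfBalloons2 := by
  intro text _
  unfold Spec_maxNumberOfBalloons2 maxNumberOfBalloons2 maxNumberOfBalloons2_alt
  simp only [freq_getD text 'b' (by decide), freq_getD text 'a' (by decide),
    freq_getD text 'l' (by decide), freq_getD text 'o' (by decide),
    freq_getD text 'n' (by decide), counters_eq text.toList 0 0 0 0 0]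
  rw [pvDrain_eq (0 + (text.toList.count 'b' : Int)).toNat _ _ _ _ _ _ le_rfl
        (by positivity) (by positivity) (by positivity) (by positivity) (by positivity)]
  simp [min_assoc]
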